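-- pv_equiv track=rewrite | github.com/shaybu/UdemyPython | code_exercise_functions.py | myfunc3
-- ===== SOURCE A (Python) =====
-- def myfunc3(string):
--     result = ''
--     for i, char in enumerate(string):
--         if i % 2 == 0:
--             result += char.lower()
--         else:
--             result += char.upper()
--     return result
-- ===== SOURCE B (Python) =====
-- def myfunc3(string):
--     out = []
--     it = iter(string)
--     for a in it:
--         out.append(a.lower())
--         b = next(it, None)
--         if b is None:
--             break
--         out.append(b.upper())
--     return ''.join(out)
-- ===== Notes on version B (the rewrite author's own statement) =====
-- stated objective: simpler
-- what changed: Replaces the enumerate loop with index-parity tests by direct structural recursion that consumes two characters at a time (lower the first, upper the second), so no index is tracked at all.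
import Mathlib
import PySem

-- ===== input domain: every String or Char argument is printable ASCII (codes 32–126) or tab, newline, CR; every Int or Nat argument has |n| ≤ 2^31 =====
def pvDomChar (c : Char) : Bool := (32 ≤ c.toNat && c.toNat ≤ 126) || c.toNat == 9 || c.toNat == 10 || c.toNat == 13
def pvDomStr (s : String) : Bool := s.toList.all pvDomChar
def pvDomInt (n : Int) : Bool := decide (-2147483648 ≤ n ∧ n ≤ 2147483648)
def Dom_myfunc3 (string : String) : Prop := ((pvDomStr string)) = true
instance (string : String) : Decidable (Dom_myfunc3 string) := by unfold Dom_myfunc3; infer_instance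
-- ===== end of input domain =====

-- B replaces the enumerate loop with parity tests by a two-at-a-time pairing pass (lower, then upper) that tracks no index; same cost, plainer structure.


-- ===== PORT A =====
-- for i, char in enumerate(string): result += char.lower() if i % 2 == 0 else char.upper()
def myfunc3 (string : String) : String :=
  String.ofList ((PySem.List.enumerate string.toList 0).foldl
    (fun result ic =>
      if PySem.Int.mod ic.1 2 == 0 then result ++ [PySem.Chars.lowerChar ic.2]
      else result ++ [PySem.Chars.upperChar ic.2]) [])

-- ===== PORT B =====
-- the for-loop over the iterator with an inner next(it, None): consume two chars per step,
-- lowering the first and uppering the second; a lone trailing char is lowered and the loop breaks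
def myfunc3AltGo : List Char → List Char
  | [] => []
  | [a] => [PySem.Chars.lowerChar a]
  | a :: b :: rest => PySem.Chars.lowerChar a :: PySem.Chars.upperChar b :: myfunc3AltGo rest

def myfunc3_alt (string : String) : String :=
  String.ofList (myfunc3AltGo string.toList)

-- ===== PRECONDITION & SPEC =====
def Spec_myfunc3 (string : String) (out : String) : Prop := out = myfunc3_alt string
instance (string : String) (out : String) : Decidable (Spec_myfunc3 string out) := by unfold Spec_myfunc3; infer_instance

-- ===== CLAIM (what is proved, stated in full; the proofs are below) =====
def Claim_equal_myfunc3 : Prop := ∀ (string : String), Dom_myfunc3 string → Spec_myfunc3 string (myfunc3 string)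

-- ===== LEMMAS AND PROOFS =====

-- A's loop body as a map over the enumerated list
def pvAltF (ic : Int × Char) : Char :=
  if PySem.Int.mod ic.1 2 == 0 then PySem.Chars.lowerChar ic.2 else PySem.Chars.upperChar ic.2

lemma pvMap_enumerate_even (s : List Char) (n : Nat) :
    (PySem.List.enumerate s (2 * n)).map pvAltF = myfunc3AltGo s := by
  induction s using myfunc3AltGo.induct generalizing n with
  | case1 => simp [PySem.List.enumerate_nil, myfunc3AltGo]
  | case2 a =>
    simp [PySem.List.enumerate_cons, PySem.List.enumerate_nil, myfunc3AltGo, pvAltF,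
      PySem.Int.mod]
  | case3 a b rest ih =>
    have h1 : PySem.Int.mod (2 * (n : Int)) 2 = 0 := by simp [PySem.Int.mod]
    have h2 : PySem.Int.mod (2 * (n : Int) + 1) 2 = 1 := by simp [PySem.Int.mod]
    have hrest := ih (n + 1)
    push_cast at hrest
    have harith : (2 : Int) * (n : Int) + 1 + 1 = 2 * ((n : Int) + 1) := by ring
    simp only [PySem.List.enumerate_cons, List.map_cons, pvAltF, h1, h2, myfunc3AltGo,
      harith, hrest]
    simp

theorem myfunc3_spec : Claim_equal_myfunc3 := by
  intro s _
  unfold Spec_myfunc3 myfunc3 myfunc3_alt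
  have hbody : (fun (result : List Char) (ic : Int × Char) =>
      if PySem.Int.mod ic.1 2 == 0 then result ++ [PySem.Chars.lowerChar ic.2]
      else result ++ [PySem.Chars.upperChar ic.2])
      = fun result ic => result ++ [pvAltF ic] := by
    funext r ic; unfold pvAltF; split <;> rfl
  rw [hbody, PySem.List.foldl_append_singleton_eq_map, List.nil_append]
  have h := pvMap_enumerate_even s.toList 0
  norm_num at h
  rw [h]
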